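-- pv_equiv track=rewrite | github.com/Cybrito-Labs/CipherVerse | CipherVerse_backend.py | lorenz_encrypt
-- ===== SOURCE A (Python) =====
-- def lorenz_stream(wheels, length):
--     import string
--
--     ALPHABET = string.ascii_uppercase + " "
--     stream = []
--     for i in range(length):
--         value = 0
--         for w in wheels:
--             value ^= w[i % len(w)]
--         stream.append(value)
--     return stream
--
-- def lorenz_encrypt(text, wheels):
--     import string
--
--     ALPHABET = string.ascii_uppercase + " "
--     text = text.upper()
--     stream = lorenz_stream(wheels, len(text))
--     result = ""
--
--     for i, ch in enumerate(text):
--         if ch in ALPHABET: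
--             idx = ALPHABET.index(ch)
--             result += ALPHABET[(idx ^ stream[i]) % len(ALPHABET)]
--         else:
--             result += ch
--
--     return result
-- ===== SOURCE B (Python) =====
-- def lorenz_encrypt(text, wheels):
--     import string
--
--     ALPHABET = string.ascii_uppercase + " "
--     text = text.upper()
--     n = len(text)
--
--     # The keystream is periodic with period L = lcm of the wheel lengths:
--     # w[i % len(w)] depends only on i mod len(w), which depends only on i mod L.
--     # So precompute ONE combined key table of length min(L, n) and index it cyclically,
--     # instead of materialising a keystream entry for every position of the text.
--     def gcd(a, b):
--         while b:
--             a, b = b, a % b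
--         return a
--
--     L = 1
--     for w in wheels:
--         g = gcd(L, len(w))
--         L = L * len(w) // g if g else 0
--
--     key = []
--     for i in range(min(L, n)):
--         v = 0
--         for w in wheels:
--             v ^= w[i % len(w)]
--         key.append(v)
--
--     out = []
--     for i, ch in enumerate(text):
--         if ch in ALPHABET:
--             out.append(ALPHABET[(ALPHABET.index(ch) ^ key[i % L]) % len(ALPHABET)])
--         else:
--             out.append(ch)
--     return "".join(out)
-- ===== Notes on version B (the rewrite author's own statement) =====
-- stated objective: faster
-- what changed: B exploits the lcm-periodicity of the keystream: it computes L = lcm of the wheel lengths and builds one combined key table of length min(L, n), indexed cyclically with i % L, instead of A's full-length stream with an inner XOR-fold over all wheels at every text position.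
import Mathlib
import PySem

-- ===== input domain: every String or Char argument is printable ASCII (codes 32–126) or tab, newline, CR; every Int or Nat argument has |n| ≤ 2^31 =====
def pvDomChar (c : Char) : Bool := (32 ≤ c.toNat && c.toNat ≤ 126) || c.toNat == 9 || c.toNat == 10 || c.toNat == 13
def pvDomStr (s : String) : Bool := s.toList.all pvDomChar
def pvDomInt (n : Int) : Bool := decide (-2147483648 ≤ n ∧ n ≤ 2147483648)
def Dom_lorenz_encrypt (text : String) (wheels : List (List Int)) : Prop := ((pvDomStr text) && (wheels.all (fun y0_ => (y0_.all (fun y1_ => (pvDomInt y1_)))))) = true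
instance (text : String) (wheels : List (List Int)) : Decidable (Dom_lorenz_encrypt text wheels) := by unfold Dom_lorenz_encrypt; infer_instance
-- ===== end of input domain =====

-- B exploits the lcm-periodicity of the keystream: one combined key table of length
-- min(lcm of wheel lengths, len(text)) indexed cyclically, instead of A's full-length
-- stream list; objective: alternative algorithm.

-- ===== PORT A =====
-- ALPHABET = string.ascii_uppercase + " "
def pvAlph : List Char := "ABCDEFGHIJKLMNOPQRSTUVWXYZ ".toList

-- helper lorenz_stream(wheels, length); w[i % len(w)] uses pyGetD 0: exact under
-- Pre_ (every wheel nonempty when the text is nonempty), the only raising case.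
def lorenz_stream (wheels : List (List Int)) (length : Int) : List Int :=
  (PySem.List.pyRange 0 length 1).foldl
    (fun stream i =>
      stream ++ [wheels.foldl
        (fun value w =>
          PySem.Int.bxor value (PySem.List.pyGetD w (PySem.Int.mod i (Int.ofNat w.length)) 0)) 0])
    []

-- result built as a List Char ('result += c' appends one character), String.mk at the end.
-- 'ch in ALPHABET' is membership for a single character: List.contains is exact here.
def lorenz_encrypt (text : String) (wheels : List (List Int)) : String :=
  let t := (PySem.Str.upper text).toList
  let stream := lorenz_stream wheels (Int.ofNat t.length)
  String.mk
    ((PySem.List.enumerate t).foldl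
      (fun result p =>
        if pvAlph.contains p.2 then
          result ++ [PySem.List.pyGetD pvAlph
            (PySem.Int.mod
              (PySem.Int.bxor (Int.ofNat ((PySem.List.index? pvAlph p.2).getD 0))
                (PySem.List.pyGetD stream p.1 0)) 27) ' ']
        else result ++ [p.2])
      [])

-- ===== PORT B =====
-- Source B's inner Euclid helper 'gcd(a, b)' (the while-loop, as structural recursion);
-- all operands are nonnegative, so Nat % and / are exact for Python's % and //
def pvGcd : Nat → Nat → Nat
  | a, 0 => a
  | a, Nat.succ b => pvGcd (Nat.succ b) (a % Nat.succ b)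
  termination_by _ b => b
  decreasing_by exact Nat.lt_of_lt_of_le (Nat.mod_lt _ (Nat.succ_pos b)) (Nat.le_refl _)

-- Source B's L loop: L = L * len(w) // g if g else 0
def pvL (wheels : List (List Int)) : Nat :=
  wheels.foldl
    (fun L w =>
      let g := pvGcd L w.length
      if g = 0 then 0 else L * w.length / g) 1

-- single combined key table of length min(L, n); lookup key[i % L]
def lorenz_encrypt_alt (text : String) (wheels : List (List Int)) : String :=
  let t := (PySem.Str.upper text).toList
  let n := t.length
  let L := pvL wheels
  let key := (PySem.List.pyRange 0 (Int.ofNat (min L n)) 1).foldl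
    (fun key i =>
      key ++ [wheels.foldl
        (fun v w =>
          PySem.Int.bxor v (PySem.List.pyGetD w (PySem.Int.mod i (Int.ofNat w.length)) 0)) 0]) []
  String.mk
    ((PySem.List.enumerate t).foldl
      (fun out p =>
        if pvAlph.contains p.2 then
          out ++ [PySem.List.pyGetD pvAlph
            (PySem.Int.mod
              (PySem.Int.bxor (Int.ofNat ((PySem.List.index? pvAlph p.2).getD 0))
                (PySem.List.pyGetD key (PySem.Int.mod p.1 (Int.ofNat L)) 0)) 27) ' ']
        else out ++ [p.2])
      [])

-- ===== PRECONDITION & SPEC =====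
-- Pre_ excludes exactly the inputs where A raises (ZeroDivisionError from i % len(w)
-- with an empty wheel, reached whenever the text is nonempty).
def Pre_lorenz_encrypt (text : String) (wheels : List (List Int)) : Prop :=
  text.toList = [] ∨ ∀ w ∈ wheels, w ≠ []
instance (text : String) (wheels : List (List Int)) : Decidable (Pre_lorenz_encrypt text wheels) := by unfold Pre_lorenz_encrypt; infer_instance

def pvWitness_lorenz_encrypt : String × List (List Int) := ("Hi there!", [[3, 7], [1, 2, 5]])

def Spec_lorenz_encrypt (text : String) (wheels : List (List Int)) (out : String) : Prop := out = lorenz_encrypt_alt text wheels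
instance (text : String) (wheels : List (List Int)) (out : String) : Decidable (Spec_lorenz_encrypt text wheels out) := by unfold Spec_lorenz_encrypt; infer_instance

-- ===== CLAIM (what is proved, stated in full; the proofs are below) =====
def Claim_equal_lorenz_encrypt : Prop := ∀ (text : String) (wheels : List (List Int)), Dom_lorenz_encrypt text wheels → Pre_lorenz_encrypt text wheels → Spec_lorenz_encrypt text wheels (lorenz_encrypt text wheels)

-- ===== LEMMAS AND PROOFS =====

-- the keystream value at position i, as both ports compute it
def pvKS (wheels : List (List Int)) (i : Int) : Int :=
  wheels.foldl
    (fun value w =>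
      PySem.Int.bxor value (PySem.List.pyGetD w (PySem.Int.mod i (Int.ofNat w.length)) 0)) 0

lemma pvGcd_eq (a b : Nat) : pvGcd a b = Nat.gcd a b := by
  induction b using Nat.strong_induction_on generalizing a with
  | _ b ih =>
    cases b with
    | zero => simp [pvGcd]
    | succ b =>
      rw [pvGcd, ih (a % Nat.succ b) (Nat.mod_lt _ (Nat.succ_pos b)) (Nat.succ b)]
      rw [Nat.gcd_comm (Nat.succ b), ← Nat.gcd_rec, Nat.gcd_comm]

lemma pvL_eq (wheels : List (List Int)) :
    pvL wheels = wheels.foldl (fun L w => Nat.lcm L w.length) 1 := by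
  unfold pvL
  apply PySem.List.foldl_congr_mem
  intro L w _
  dsimp only
  rw [pvGcd_eq]
  by_cases h : Nat.gcd L w.length = 0
  · rw [if_pos h]
    obtain ⟨h1, h2⟩ := Nat.gcd_eq_zero_iff.mp h
    simp [h1, h2, Nat.lcm]
  · rw [if_neg h]; rfl

lemma dvd_foldl_lcm_init {a b : Nat} (ws : List (List Int)) (h : b ∣ a) :
    b ∣ ws.foldl (fun L w => Nat.lcm L w.length) a := by
  induction ws generalizing a with
  | nil => exact h
  | cons x xs ih => exact ih (h.trans (Nat.dvd_lcm_left _ _))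

lemma dvd_foldl_lcm {w : List Int} (ws : List (List Int)) (a : Nat) (hw : w ∈ ws) :
    w.length ∣ ws.foldl (fun L v => Nat.lcm L v.length) a := by
  induction ws generalizing a with
  | nil => cases hw
  | cons x xs ih =>
    simp only [List.foldl_cons]
    cases hw with
    | head => exact dvd_foldl_lcm_init xs (Nat.dvd_lcm_right _ _)
    | tail _ hmem => exact ih _ hmem

lemma foldl_lcm_pos {a : Nat} (ws : List (List Int)) (ha : 0 < a)
    (h : ∀ w ∈ ws, w ≠ []) : 0 < ws.foldl (fun L w => Nat.lcm L w.length) a := by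
  induction ws generalizing a with
  | nil => exact ha
  | cons x xs ih =>
    refine ih (Nat.pos_of_ne_zero ?_) (fun w hw => h w (List.mem_cons_of_mem _ hw))
    have hx : x.length ≠ 0 := by
      simpa [List.length_eq_zero_iff] using h x List.mem_cons_self
    exact Nat.lcm_ne_zero ha.ne' hx

lemma lorenz_stream_eq_map (wheels : List (List Int)) (n : Int) :
    lorenz_stream wheels n = (PySem.List.pyRange 0 n 1).map (pvKS wheels) := by
  unfold lorenz_stream pvKS
  rw [PySem.List.foldl_append_singleton_eq_map]
  simp

lemma stream_getD (wheels : List (List Int)) (n k : Nat) (hk : k < n) :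
    PySem.List.pyGetD (lorenz_stream wheels (Int.ofNat n)) (Int.ofNat k) 0
      = pvKS wheels (Int.ofNat k) := by
  rw [lorenz_stream_eq_map]
  exact PySem.List.pyGetD_map_pyRange _ n k 0 hk

-- periodicity: the keystream value depends only on the position mod L when every wheel length divides L
lemma pvKS_mod (wheels : List (List Int)) (k L : Nat)
    (hdvd : ∀ w ∈ wheels, w.length ∣ L) :
    pvKS wheels (Int.ofNat (k % L)) = pvKS wheels (Int.ofNat k) := by
  unfold pvKS
  apply PySem.List.foldl_congr_mem
  intro value w hw
  congr 1
  congr 1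
  have : (k % L) % w.length = k % w.length := Nat.mod_mod_of_dvd k (hdvd w hw)
  simp only [Int.ofNat_eq_natCast, PySem.Int.mod_natCast]
  exact_mod_cast this

-- both output loops, turned into a map over the enumeration
lemma out_foldl_eq_map (f : Int × Char → Char) (l : List (Int × Char)) :
    l.foldl (fun r p => if pvAlph.contains p.2 then r ++ [f p] else r ++ [p.2]) []
      = l.map (fun p => if pvAlph.contains p.2 then f p else p.2) := by
  have h : (fun (r : List Char) (p : Int × Char) =>
      if pvAlph.contains p.2 then r ++ [f p] else r ++ [p.2])
      = fun r p => r ++ [if pvAlph.contains p.2 then f p else p.2] := by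
    funext r p; split <;> rfl
  rw [h, PySem.List.foldl_append_singleton_eq_map]
  simp

-- B's key table is the keystream over the first min(L, n) positions
lemma key_eq_map (wheels : List (List Int)) (m : Nat) :
    (PySem.List.pyRange 0 (Int.ofNat m) 1).foldl
      (fun key i =>
        key ++ [wheels.foldl
          (fun v w =>
            PySem.Int.bxor v (PySem.List.pyGetD w (PySem.Int.mod i (Int.ofNat w.length)) 0)) 0]) []
      = (PySem.List.pyRange 0 (Int.ofNat m) 1).map (pvKS wheels) := by
  unfold pvKS
  rw [PySem.List.foldl_append_singleton_eq_map]
  simp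

-- the cyclic lookup in B's key table is the keystream value at k
lemma key_lookup (wheels : List (List Int)) (n k : Nat) (hk : k < n)
    (hw : ∀ w ∈ wheels, w ≠ []) :
    PySem.List.pyGetD
      ((PySem.List.pyRange 0 (Int.ofNat (min (pvL wheels) n)) 1).foldl
        (fun key i =>
          key ++ [wheels.foldl
            (fun v w =>
              PySem.Int.bxor v (PySem.List.pyGetD w (PySem.Int.mod i (Int.ofNat w.length)) 0)) 0]) [])
      (PySem.Int.mod (Int.ofNat k) (Int.ofNat (pvL wheels))) 0
      = pvKS wheels (Int.ofNat k) := by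
  have hL : 0 < pvL wheels := by
    rw [pvL_eq]; exact foldl_lcm_pos wheels Nat.one_pos hw
  have hdvd : ∀ w ∈ wheels, w.length ∣ pvL wheels := by
    intro w hmem; rw [pvL_eq]; exact dvd_foldl_lcm wheels 1 hmem
  have hmod : PySem.Int.mod (Int.ofNat k) (Int.ofNat (pvL wheels))
      = Int.ofNat (k % pvL wheels) := by
    simp [PySem.Int.mod_natCast]
  have hklt : k % pvL wheels < min (pvL wheels) n :=
    Nat.lt_min.mpr (And.intro (Nat.mod_lt k hL) (Nat.lt_of_le_of_lt (Nat.mod_le k _) hk))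
  rw [key_eq_map, hmod]
  exact (PySem.List.pyGetD_map_pyRange (pvKS wheels) _ _ 0 hklt).trans
    (pvKS_mod wheels k (pvL wheels) hdvd)

-- ===== VERDICT (by name: the statement is the Claim_ definition above) =====
set_option maxHeartbeats 1000000 in
theorem lorenz_encrypt_spec : Claim_equal_lorenz_encrypt := by
  intro text wheels _ hpre
  unfold Spec_lorenz_encrypt lorenz_encrypt lorenz_encrypt_alt
  dsimp only
  rw [out_foldl_eq_map, out_foldl_eq_map]
  apply congrArg String.mk
  apply List.map_congr_left
  intro p hp
  obtain ⟨k, hk, rfl⟩ := (PySem.List.mem_enumerate_iff _ _ _).mp hp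
  have hw : ∀ w ∈ wheels, w ≠ [] := by
    rcases hpre with hempty | hw
    · exfalso
      have ht : (PySem.Str.upper text).toList = [] := by
        simp [PySem.Str.toList_upper, PySem.Chars.upper, hempty]
      rw [ht] at hk
      exact Nat.not_lt_zero k hk
    · exact hw
  by_cases hc : pvAlph.contains ((PySem.Str.upper text).toList[k])
  · simp only [hc, if_true, Int.zero_add]
    rw [show ((k : Int)) = Int.ofNat k from rfl, stream_getD _ _ k hk,
      key_lookup wheels _ k hk hw]
  · rw [if_neg hc, if_neg hc]
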